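-- pv_equiv track=rewrite | github.com/Aweirdanomaly/SchoolWork | Freshman Year/CS111/Problem Set 7/ps7image/ps7pr5.py | fold_diag
-- ===== SOURCE A (Python) =====
-- def create_uniform_image(height, width, pixel):
--     """ creates and returns a 2-D list of pixels with height rows and
--         width columns in which all of the pixels have the RGB values
--         given by pixel
--         inputs: height and width are non-negative integers
--                 pixel is a 1-D list of RBG values of the form [R,G,B],
--                      where each element is an integer between 0 and 255.
--     """
--     pixels = []
--
--     for r in range(height):
--         row = [pixel] * width
--         pixels += [row]
--
--     return pixels
--
-- def blank_image(height, width):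
--     """ creates and returns a 2-D list of pixels with height rows and
--         width columns in which all of the pixels are green.
--         inputs: height and width are non-negative integers
--     """
--     all_green = create_uniform_image(height, width, [0, 255, 0])
--     return all_green
--
-- def fold_diag(pixels):
--     """ takes in a list of [R, G, B] lists 'pixels' and returns half
--     of the image from its diagonal upward"""
--     copy = blank_image(len(pixels), len(pixels[0]))
--     for r in range(len(pixels)):
--         for c in range(len(pixels[0])):
--             copy[r][c] = pixels[r][c]
--     for r in range(len(pixels)):
--          for c in range(r):
--              copy[r][c] = [255, 255, 255]
--     return copy
-- ===== SOURCE B (Python) =====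
-- def fold_diag(pixels):
--     """ takes in a list of [R, G, B] lists 'pixels' and returns half
--     of the image from its diagonal upward"""
--     width = len(pixels[0])
--     result = []
--     for r, row in enumerate(pixels):
--         result.append([[255, 255, 255] if c < r else row[c] for c in range(width)])
--     return result
-- ===== Notes on version B (the rewrite author's own statement) =====
-- stated objective: simpler
-- what changed: A's three phases (allocate a green blank image, copy every cell, overwrite the lower triangle) are collapsed into a single enumerate pass that builds each output row directly with a per-cell conditional, with no blank-image allocation or in-place assignment.
-- crash fix: On non-empty images where A's full copy or its triangle overwrite indexes past a row's end (a row shorter than width, or more rows than width+1) but B's single pass only reads cells with r <= c < width that exist, A raises IndexError while B returns the folded image. — e.g. on fold_diag([[[1, 1, 1]], [[2, 2, 2]], [[3, 3, 3]]]): A raises IndexError, B returns [[[1, 1, 1]], [[255, 255, 255]], [[255, 255, 255]]]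
import Mathlib
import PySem

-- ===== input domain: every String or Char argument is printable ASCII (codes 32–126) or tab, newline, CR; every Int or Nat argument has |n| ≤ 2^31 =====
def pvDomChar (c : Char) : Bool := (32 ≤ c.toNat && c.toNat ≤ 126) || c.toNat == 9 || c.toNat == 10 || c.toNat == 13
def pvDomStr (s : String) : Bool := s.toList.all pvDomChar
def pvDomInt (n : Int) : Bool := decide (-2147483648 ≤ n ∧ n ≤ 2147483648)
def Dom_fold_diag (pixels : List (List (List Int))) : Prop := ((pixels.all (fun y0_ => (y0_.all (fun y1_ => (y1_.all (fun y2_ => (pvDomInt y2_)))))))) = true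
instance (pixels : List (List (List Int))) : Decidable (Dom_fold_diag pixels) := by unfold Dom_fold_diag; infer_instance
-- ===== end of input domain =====

-- B collapses A's three phases (blank green image, full copy, lower-triangle overwrite)
-- into one enumerate pass building each row with a per-cell conditional (objective: simpler).

-- ===== PORT A =====
def create_uniform_image (height width : Int) (pixel : List Int) : List (List (List Int)) :=
  (PySem.List.pyRange 0 height 1).foldl
    (fun pixels _r => pixels ++ [PySem.List.pyRepeat [pixel] width]) []

def blank_image (height width : Int) : List (List (List Int)) :=
  create_uniform_image height width [0, 255, 0]

def fold_diag (pixels : List (List (List Int))) : List (List (List Int)) :=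
  -- len(pixels[0]) — pixels[0] raises on empty input, excluded by Pre_; out-of-range
  -- reads/writes (also excluded by Pre_) use the pyGetD/pySetD total forms
  let copy0 := blank_image (PySem.List.len pixels) (PySem.List.len (PySem.List.pyGetD pixels 0 []))
  let copy1 := (PySem.List.pyRange 0 (PySem.List.len pixels) 1).foldl
    (fun cp r => (PySem.List.pyRange 0 (PySem.List.len (PySem.List.pyGetD pixels 0 [])) 1).foldl
      (fun cp c => PySem.List.pySetD cp r
        (PySem.List.pySetD (PySem.List.pyGetD cp r [])
          c (PySem.List.pyGetD (PySem.List.pyGetD pixels r []) c []))) cp) copy0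
  (PySem.List.pyRange 0 (PySem.List.len pixels) 1).foldl
    (fun cp r => (PySem.List.pyRange 0 r 1).foldl
      (fun cp c => PySem.List.pySetD cp r
        (PySem.List.pySetD (PySem.List.pyGetD cp r []) c [255, 255, 255])) cp) copy1

-- ===== PORT B =====
def fold_diag_alt (pixels : List (List (List Int))) : List (List (List Int)) :=
  -- width = len(pixels[0]); then one enumerate pass: white below the diagonal, the pixel otherwise
  let width := PySem.List.len (PySem.List.pyGetD pixels 0 [])
  (PySem.List.enumerate pixels 0).foldl
    (fun res p => res ++ [(PySem.List.pyRange 0 width 1).map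
      (fun c => if c < p.1 then [255, 255, 255] else PySem.List.pyGetD p.2 c [])]) []

-- ===== PRECONDITION & SPEC =====
-- Pre_ excludes exactly the inputs where A raises IndexError: empty pixels (pixels[0]),
-- a row shorter than row 0 (the pixels[r][c] read), and images with more rows than
-- width+1 (the triangle write copy[r][c] reaches c ≥ width there).
def Pre_fold_diag (pixels : List (List (List Int))) : Prop :=
  pixels ≠ [] ∧ (∀ row ∈ pixels, (pixels.getD 0 []).length ≤ row.length) ∧
    pixels.length ≤ (pixels.getD 0 []).length + 1
instance (pixels : List (List (List Int))) : Decidable (Pre_fold_diag pixels) := by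
  unfold Pre_fold_diag; infer_instance
def pvWitness_fold_diag : List (List (List Int)) :=
  [[[1, 2, 3], [4, 5, 6]], [[7, 8, 9], [10, 11, 12]]]

-- Where A raises IndexError (a row shorter than width is read, or the triangle write
-- reaches c ≥ width because the image has more rows than width+1) but B's single pass
-- never touches those cells (every cell it reads has r ≤ c < width and c < len(row)),
-- B returns the folded image instead of the exception.
def Raises_fold_diag (pixels : List (List (List Int))) : Prop :=
  pixels ≠ [] ∧
    (∀ r < pixels.length, (pixels.getD 0 []).length ≤ r ∨
      (pixels.getD 0 []).length ≤ (pixels.getD r []).length) ∧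
    ((∃ r < pixels.length, (pixels.getD r []).length < (pixels.getD 0 []).length) ∨
      (pixels.getD 0 []).length + 1 < pixels.length)
instance (pixels : List (List (List Int))) : Decidable (Raises_fold_diag pixels) := by
  unfold Raises_fold_diag; infer_instance
def pvRaiseWitness_fold_diag : List (List (List Int)) :=
  [[[1, 1, 1]], [[2, 2, 2]], [[3, 3, 3]]]
def pvRaiseWitnessOut_fold_diag : List (List (List Int)) :=
  [[[1, 1, 1]], [[255, 255, 255]], [[255, 255, 255]]]

def Spec_fold_diag (pixels : List (List (List Int))) (out : List (List (List Int))) : Prop :=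
  out = fold_diag_alt pixels
instance (pixels : List (List (List Int))) (out : List (List (List Int))) : Decidable (Spec_fold_diag pixels out) := by unfold Spec_fold_diag; infer_instance

-- ===== CLAIM (what is proved, stated in full; the proofs are below) =====
def Claim_equal_fold_diag : Prop := ∀ (pixels : List (List (List Int))), Dom_fold_diag pixels → Pre_fold_diag pixels → Spec_fold_diag pixels (fold_diag pixels)
def Claim_raises_fold_diag : Prop := (∀ (pixels : List (List (List Int))), Dom_fold_diag pixels → Raises_fold_diag pixels → ¬ Pre_fold_diag pixels) ∧ (Dom_fold_diag (pvRaiseWitness_fold_diag) ∧ Raises_fold_diag (pvRaiseWitness_fold_diag) ∧ fold_diag_alt (pvRaiseWitness_fold_diag) = pvRaiseWitnessOut_fold_diag)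

-- ===== LEMMAS AND PROOFS =====

-- the closed form both ports are reduced to: row r of the result is
-- range(width) mapped through 'white below the diagonal, original pixel otherwise'
def canonImage (pixels : List (List (List Int))) : List (List (List Int)) :=
  (List.range pixels.length).map (fun r =>
    (List.range (pixels.getD 0 []).length).map (fun c =>
      if c < r then [255, 255, 255] else (pixels.getD r []).getD c []))

-- a fold writing cells 0..n-1 of g, where the written value may read the current cell:
-- cell r is written once and was untouched before, so the fold is a map on the prefix
theorem setFold {α : Type} (d : α) (h : Nat → α → α) :
    ∀ (n : Nat) (g : List α), n ≤ g.length →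
    (List.range n).foldl (fun cp r => cp.set r (h r (cp.getD r d))) g
      = (List.range n).map (fun r => h r (g.getD r d)) ++ g.drop n := by
  intro n
  induction n with
  | zero => simp
  | succ n ih =>
    intro g hn
    rw [List.range_succ, List.foldl_append, List.map_append, ih g (by omega)]
    have hmaplen : ((List.range n).map (fun r => h r (g.getD r d))).length = n := by simp
    have hng : n < g.length := by omega
    have hget : ((List.range n).map (fun r => h r (g.getD r d)) ++ g.drop n).getD n d
        = g.getD n d := by
      rw [List.getD_append_right _ _ _ _ (by omega), hmaplen, Nat.sub_self,
        List.getD_eq_getElem?_getD, List.getElem?_drop, Nat.add_zero,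
        List.getD_eq_getElem?_getD]
    have hdrop : g.drop n = g[n] :: g.drop (n + 1) := List.drop_eq_getElem_cons hng
    simp only [List.foldl_cons, List.foldl_nil, hget]
    rw [hdrop, List.set_append]
    simp [List.getD_eq_getElem?_getD, List.getElem?_eq_getElem hng]
    rw [hdrop, List.set_cons_zero]

-- the inner column loop of A only touches row k of the grid: it is a row update set back once
theorem innerRow {α : Type} (k : Nat) (v : Nat → α) :
    ∀ (L : List Nat) (cp : List (List α)),
    L.foldl (fun cp c => cp.set k ((cp.getD k []).set c (v c))) cp
      = cp.set k (L.foldl (fun row c => row.set c (v c)) (cp.getD k [])) := by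
  intro L
  induction L with
  | nil =>
    intro cp
    by_cases hk : k < cp.length
    · rw [List.foldl_nil, List.foldl_nil, List.getD_eq_getElem?_getD,
        List.getElem?_eq_getElem hk, Option.getD_some, List.set_getElem_self hk]
    · rw [List.foldl_nil, List.foldl_nil, List.set_eq_of_length_le (by omega)]
  | cons c L ih =>
    intro cp
    by_cases hk : k < cp.length
    · rw [List.foldl_cons, ih, List.set_set]
      congr 1
      rw [List.foldl_cons]
      congr 1
      rw [List.getD_eq_getElem?_getD, List.getElem?_set_self hk, Option.getD_some,
        List.getD_eq_getElem?_getD]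
    · have hset : ∀ (x : List α), cp.set k x = cp :=
        fun x => List.set_eq_of_length_le (by omega)
      rw [List.foldl_cons, hset, ih, hset, hset]

-- a prefix of whites glued to the tail of the copied row is the per-cell conditional row
theorem rowEq {α : Type} (W : α) (f : Nat → α) (r w : Nat) (hrw : r ≤ w) :
    (List.range r).map (fun _ => W) ++ ((List.range w).map f).drop r
      = (List.range w).map (fun c => if c < r then W else f c) := by
  have hw : w = r + (w - r) := by omega
  rw [hw, List.range_add, List.map_append, List.map_append, List.drop_left' (by simp)]
  congr 1
  · exact (List.map_congr_left (fun c hc => by simp [List.mem_range.mp hc])).symm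
  · rw [List.map_map, List.map_map]
    exact List.map_congr_left (fun j _ => by simp)

theorem blank_eq (n w : Nat) : blank_image (n : Int) (w : Int)
    = List.replicate n (List.replicate w ([0, 255, 0] : List Int)) := by
  unfold blank_image create_uniform_image
  rw [PySem.List.foldl_append_singleton_eq_map]
  simp [PySem.List.pyRepeat_singleton, PySem.List.pyRange_zero_nat]
  rw [Function.comp_def, List.map_const', List.length_range]

-- phase 2 (copy every cell) turns the blank image into the full copy, row by row
theorem phase2_eq (pixels : List (List (List Int))) (n w : Nat)
    (copy0 : List (List (List Int)))
    (h0 : copy0 = List.replicate n (List.replicate w ([0, 255, 0] : List Int))) :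
    (PySem.List.pyRange 0 (n : Int) 1).foldl
      (fun cp r => (PySem.List.pyRange 0 (w : Int) 1).foldl
        (fun cp c => PySem.List.pySetD cp r
          (PySem.List.pySetD (PySem.List.pyGetD cp r [])
            c (PySem.List.pyGetD (PySem.List.pyGetD pixels r []) c []))) cp) copy0
    = (List.range n).map (fun r => (List.range w).map (fun c => (pixels.getD r []).getD c [])) := by
  simp only [PySem.List.pyRange_zero_nat, List.foldl_map, PySem.List.pySetD_natCast,
    PySem.List.pyGetD_natCast]
  have hbody : (fun (cp : List (List (List Int))) (r : Nat) =>
      (List.range w).foldl (fun cp c => cp.set r ((cp.getD r []).set c ((pixels.getD r []).getD c []))) cp)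
      = (fun cp r => cp.set r ((List.range w).foldl (fun row c => row.set c ((pixels.getD r []).getD c [])) (cp.getD r []))) := by
    funext cp r
    rw [innerRow]
  rw [hbody, setFold ([] : List (List Int))
      (fun r row => (List.range w).foldl (fun row c => row.set c ((pixels.getD r []).getD c [])) row)
      n copy0 (by simp [h0])]
  have hrow : ∀ r < n, (List.range w).foldl
      (fun row c => row.set c ((pixels.getD r []).getD c [])) (copy0.getD r ([] : List (List Int)))
      = (List.range w).map (fun c => (pixels.getD r []).getD c []) := by
    intro r hr
    have : copy0.getD r [] = List.replicate w ([0, 255, 0] : List Int) := by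
      rw [h0, List.getD_eq_getElem?_getD, List.getElem?_replicate, if_pos (by omega)]
      rfl
    rw [this, setFold ([] : List Int) (fun c _ => (pixels.getD r []).getD c []) w _ (by simp)]
    simp
  rw [h0]
  simp only [List.drop_replicate, Nat.sub_self, List.replicate_zero, List.append_nil]
  exact List.map_congr_left (fun r hr => by rw [← h0]; exact hrow r (List.mem_range.mp hr))

-- phase 3 (whiten the lower triangle) turns the full copy into the canonical image
theorem phase3_eq (pixels : List (List (List Int))) (n w : Nat)
    (hcnt : n ≤ w + 1)
    (copy1 : List (List (List Int)))
    (h1 : copy1 = (List.range n).map (fun r => (List.range w).map (fun c => (pixels.getD r []).getD c []))) :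
    (PySem.List.pyRange 0 (n : Int) 1).foldl
      (fun cp r => (PySem.List.pyRange 0 r 1).foldl
        (fun cp c => PySem.List.pySetD cp r
          (PySem.List.pySetD (PySem.List.pyGetD cp r []) c [255, 255, 255])) cp) copy1
    = (List.range n).map (fun r => (List.range w).map (fun c =>
        if c < r then [255, 255, 255] else (pixels.getD r []).getD c [])) := by
  simp only [PySem.List.pyRange_zero_nat, List.foldl_map, PySem.List.pySetD_natCast,
    PySem.List.pyGetD_natCast]
  have hbody : (fun (cp : List (List (List Int))) (r : Nat) =>
      (List.range r).foldl (fun cp c => cp.set r ((cp.getD r []).set c ([255, 255, 255] : List Int))) cp)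
      = (fun cp r => cp.set r ((List.range r).foldl (fun row c => row.set c ([255, 255, 255] : List Int)) (cp.getD r []))) := by
    funext cp r
    rw [innerRow]
  rw [hbody, setFold ([] : List (List Int))
      (fun r row => (List.range r).foldl (fun row c => row.set c ([255, 255, 255] : List Int)) row)
      n copy1 (by simp [h1])]
  rw [h1]
  have hdrop : ((List.range n).map (fun r => (List.range w).map (fun c => (pixels.getD r []).getD c []))).drop n
      = [] := List.drop_eq_nil_of_le (by simp)
  rw [hdrop, List.append_nil]
  refine List.map_congr_left (fun r hr => ?_)
  have hrn : r < n := List.mem_range.mp hr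
  have hget : ((List.range n).map (fun r => (List.range w).map (fun c => (pixels.getD r []).getD c []))).getD r []
      = (List.range w).map (fun c => (pixels.getD r []).getD c []) := by
    rw [List.getD_eq_getElem?_getD, List.getElem?_map, List.getElem?_range hrn]
    rfl
  rw [hget, setFold ([] : List Int) (fun c _ => ([255, 255, 255] : List Int)) r _ (by simp; omega)]
  exact rowEq ([255, 255, 255] : List Int) _ r w (by omega)

theorem aCanon (pixels : List (List (List Int)))
    (hcnt : pixels.length ≤ (pixels.getD 0 []).length + 1) :
    fold_diag pixels = canonImage pixels := by
  unfold fold_diag canonImage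
  simp only [PySem.List.len_eq, PySem.List.pyGetD_zero]
  rw [phase2_eq pixels pixels.length (pixels.getD 0 []).length _ (blank_eq _ _),
    phase3_eq pixels pixels.length (pixels.getD 0 []).length hcnt _ rfl]

theorem altCanon (pixels : List (List (List Int))) :
    fold_diag_alt pixels = canonImage pixels := by
  unfold fold_diag_alt canonImage
  rw [PySem.List.foldl_append_singleton_eq_map, PySem.List.enumerate_eq_map_pyRange pixels []]
  simp [PySem.List.pyRange_zero_nat, List.map_map, Function.comp, PySem.List.pyGetD_zero]

-- ===== VERDICT (by name: the statement is the Claim_ definition above) =====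
theorem fold_diag_spec : Claim_equal_fold_diag := by
  intro pixels _ hpre
  unfold Spec_fold_diag
  rw [aCanon pixels hpre.2.2, altCanon pixels]

theorem fold_diag_raises : Claim_raises_fold_diag := by
  unfold Claim_raises_fold_diag
  constructor
  · intro pixels _ hr hp
    obtain ⟨-, -, h1⟩ := hr
    obtain ⟨-, hrows, h2⟩ := hp
    rcases h1 with ⟨r, hrn, hshort⟩ | hlong
    · have hmem : pixels.getD r [] ∈ pixels := by
        rw [List.getD_eq_getElem?_getD, List.getElem?_eq_getElem hrn]
        exact List.getElem_mem hrn
      exact absurd (hrows _ hmem) (by omega)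
    · omega
  · exact ⟨by decide, by decide, by decide⟩

-- self-check: the crash-fix witness really lies in Raises_ and B's port returns the stated value
theorem pvRaiseWitness_fold_diag_ok :
    Raises_fold_diag pvRaiseWitness_fold_diag ∧
      fold_diag_alt pvRaiseWitness_fold_diag = pvRaiseWitnessOut_fold_diag :=
  ⟨fold_diag_raises.2.2.1, fold_diag_raises.2.2.2⟩
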